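-- pv_equiv track=rewrite | github.com/Anirudh-starhash/CRYPTO_PROJECT | project/attacks/dlp_nfs.py | BaseMExpansion
-- ===== SOURCE A (Python) =====
-- def BaseMExpansion(n,m):
--     result = []
--     q = n
--     while (q != 0):
--         a = q % m
--         q = q // m
--         result.append(a)
--     return result[::-1]
-- ===== SOURCE B (Python) =====
-- def BaseMExpansion(n, m):
--     if n == 0:
--         return []
--     return BaseMExpansion(n // m, m) + [n % m]
-- ===== Notes on version B (the rewrite author's own statement) =====
-- stated objective: simpler
-- what changed: Replaces the explicit while-loop with an accumulator list and a final [::-1] reversal by a direct recursion on n // m that emits digits most-significant-first, so no accumulator and no reversal are needed.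
import Mathlib
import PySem

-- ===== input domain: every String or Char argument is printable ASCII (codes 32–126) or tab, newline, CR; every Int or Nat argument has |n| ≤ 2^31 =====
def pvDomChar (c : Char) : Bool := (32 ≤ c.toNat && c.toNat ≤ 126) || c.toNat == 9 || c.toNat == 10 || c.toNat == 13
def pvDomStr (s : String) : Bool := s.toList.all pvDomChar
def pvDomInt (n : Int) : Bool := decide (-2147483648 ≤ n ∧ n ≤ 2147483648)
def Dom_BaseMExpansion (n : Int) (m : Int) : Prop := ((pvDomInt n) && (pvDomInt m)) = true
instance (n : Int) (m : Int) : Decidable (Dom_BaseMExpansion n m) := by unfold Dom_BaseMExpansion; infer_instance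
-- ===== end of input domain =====

-- B replaces A's while-loop + accumulator + final [::-1] by a direct recursion on n // m
-- that emits the digits most-significant-first (simpler: no accumulator, no reversal).


-- Termination measure for the digit loops (both Pythons loop on q := q // m).
def pvMu (q : Int) : Nat := 2 * q.natAbs + (if 0 < q then 1 else 0)

-- ===== PORT A =====
-- while (q != 0): a = q % m; q = q // m; result.append(a)
-- (the second conjunct of the guard is a totality guard only; under Pre_ it always holds)
def pvLoopA (q : Int) (m : Int) (result : List Int) : List Int :=
  if h : q ≠ 0 ∧ pvMu (PySem.Int.floordiv q m) < pvMu q then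
    pvLoopA (PySem.Int.floordiv q m) m (result ++ [PySem.Int.mod q m])
  else result
termination_by pvMu q
decreasing_by exact h.2

-- return result[::-1]  (reverse; PySem.List.slice?_none_none_neg_one)
def BaseMExpansion (n : Int) (m : Int) : List Int := (pvLoopA n m []).reverse

-- ===== PORT B =====
-- if n == 0: return []  else: return BaseMExpansion(n // m, m) + [n % m]
-- (the inner dite is a totality guard only; under Pre_ it always holds)
def BaseMExpansion_alt (n : Int) (m : Int) : List Int :=
  if n = 0 then []
  else if h : pvMu (PySem.Int.floordiv n m) < pvMu n then
    BaseMExpansion_alt (PySem.Int.floordiv n m) m ++ [PySem.Int.mod n m]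
  else []
termination_by pvMu n
decreasing_by exact h

-- ===== PRECONDITION & SPEC =====
-- Pre_ excludes exactly the inputs on which A does not return: m = 0 (ZeroDivisionError)
-- and the divergent cases n < 0 with m > 0, and n ≠ 0 with m ∈ {1, -1} (infinite loop).
def Pre_BaseMExpansion (n : Int) (m : Int) : Prop :=
  (2 ≤ m ∧ 0 ≤ n) ∨ m ≤ -2 ∨ (n = 0 ∧ m ≠ 0)
instance (n : Int) (m : Int) : Decidable (Pre_BaseMExpansion n m) := by
  unfold Pre_BaseMExpansion; infer_instance
def pvWitness_BaseMExpansion : Int × Int := (13, 3)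

def Spec_BaseMExpansion (n : Int) (m : Int) (out : List Int) : Prop := out = BaseMExpansion_alt n m
instance (n : Int) (m : Int) (out : List Int) : Decidable (Spec_BaseMExpansion n m out) := by unfold Spec_BaseMExpansion; infer_instance

-- ===== CLAIM (what is proved, stated in full; the proofs are below) =====
def Claim_equal_BaseMExpansion : Prop := ∀ (n : Int) (m : Int), Dom_BaseMExpansion n m → Pre_BaseMExpansion n m → Spec_BaseMExpansion n m (BaseMExpansion n m)

-- ===== LEMMAS AND PROOFS =====

-- invariant preserved and measure decreasing along q := q // m
lemma pvGood_step (q m : Int) (hg : (2 ≤ m ∧ 0 ≤ q) ∨ m ≤ -2) (hq : q ≠ 0) :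
    pvMu (PySem.Int.floordiv q m) < pvMu q ∧
    ((2 ≤ m ∧ 0 ≤ PySem.Int.floordiv q m) ∨ m ≤ -2) := by
  have hid := PySem.Int.floordiv_mul_add_mod q m
  set k := PySem.Int.floordiv q m with hk
  set r := PySem.Int.mod q m with hr
  rcases hg with ⟨hm, hn⟩ | hm
  · have hrb1 : 0 ≤ r := hr ▸ PySem.Int.mod_nonneg q (by omega)
    have hrb2 : r < m := hr ▸ PySem.Int.mod_lt q (by omega)
    have hk0 : 0 ≤ k := by nlinarith
    have h2k : 2 * k ≤ q := by nlinarith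
    refine ⟨?_, Or.inl ⟨hm, hk0⟩⟩
    simp only [pvMu]; split_ifs <;> omega
  · have hrb := PySem.Int.mod_neg_bounds q (b := m) (by omega)
    rw [← hr] at hrb
    obtain ⟨hrb1, hrb2⟩ := hrb
    rcases lt_or_gt_of_ne hq with hqneg | hqpos
    · -- q < 0, m ≤ -2 : k ≥ 0 and 2k ≤ -q
      have hk0 : 0 ≤ k := by nlinarith
      have h2k : 2 * k ≤ -q := by nlinarith
      refine ⟨?_, Or.inr hm⟩
      simp only [pvMu]; split_ifs <;> omega
    · -- q > 0, m ≤ -2 : k ≤ -1 and -q ≤ k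
      have hk0 : k ≤ -1 := by nlinarith
      have h2k : -q ≤ k := by
        by_contra hcon
        push Not at hcon
        have hp1 : 0 ≤ m * (k + q + 1) := by nlinarith [mul_nonneg (show (0:ℤ) ≤ -m by omega) (show (0:ℤ) ≤ -(k + q + 1) by omega)]
        have hp2 : q * m ≤ q * (-2) :=
          mul_le_mul_of_nonneg_left (by omega) (by omega)
        nlinarith
      refine ⟨?_, Or.inr hm⟩
      simp only [pvMu]; split_ifs <;> omega

lemma pvLoop_eq (m : Int) : ∀ (fuel : Nat) (q : Int) (acc : List Int),
    pvMu q ≤ fuel → ((2 ≤ m ∧ 0 ≤ q) ∨ m ≤ -2) →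
    pvLoopA q m acc = acc ++ (BaseMExpansion_alt q m).reverse := by
  intro fuel
  induction fuel with
  | zero =>
    intro q acc hle _
    have hq : q = 0 := by simp only [pvMu] at hle; split_ifs at hle <;> omega
    subst hq
    rw [pvLoopA, BaseMExpansion_alt]
    simp
  | succ f ih =>
    intro q acc hle hg
    by_cases hq : q = 0
    · subst hq; rw [pvLoopA, BaseMExpansion_alt]; simp
    · obtain ⟨hlt, hg'⟩ := pvGood_step q m hg hq
      rw [pvLoopA, dif_pos ⟨hq, hlt⟩, BaseMExpansion_alt, if_neg hq, dif_pos hlt,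
        ih _ _ (by omega) hg']
      simp

-- ===== VERDICT (by name: the statement is the Claim_ definition above) =====
theorem BaseMExpansion_spec : Claim_equal_BaseMExpansion := by
  intro n m _ hpre
  show BaseMExpansion n m = BaseMExpansion_alt n m
  rcases hpre with hg | hg | ⟨hn, _⟩
  · rw [BaseMExpansion, pvLoop_eq m (pvMu n) n [] le_rfl (Or.inl hg)]; simp
  · rw [BaseMExpansion, pvLoop_eq m (pvMu n) n [] le_rfl (Or.inr hg)]; simp
  · subst hn; rw [BaseMExpansion, pvLoopA, BaseMExpansion_alt]; simp
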